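-- pv_equiv track=rewrite | github.com/sheltonli/keisuke | keisuke_csp2.py | get_section_coord
-- ===== SOURCE A (Python) =====
-- def get_section_coord(row_or_col):
-- 	ls_coord = []
-- 	start = False
-- 	for i in range(len(row_or_col)):
-- 		cell = row_or_col[i]
-- 		if cell!=-1 and not start:
-- 			ls_coord.append(i)
-- 		if cell!=-1:
-- 			start = True
-- 		if cell==-1:
-- 			start = False
-- 	return ls_coord
-- ===== SOURCE B (Python) =====
-- def get_section_coord(row_or_col):
--     # two-pointer run scan: jump over maximal runs of equal (-1)-ness,
--     # record the start index of each non-(-1) run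
--     res = []
--     i = 0
--     n = len(row_or_col)
--     while i < n:
--         j = i + 1
--         while j < n and (row_or_col[j] == -1) == (row_or_col[i] == -1):
--             j += 1
--         if row_or_col[i] != -1:
--             res.append(i)
--         i = j
--     return res
-- ===== Notes on version B (the rewrite author's own statement) =====
-- stated objective: alternative
-- what changed: Replaces the per-cell boolean 'start' flag loop with a two-pointer run scan that jumps over maximal runs of equal (-1)-ness and records the start index of each non-(-1) run.
import Mathlib
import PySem

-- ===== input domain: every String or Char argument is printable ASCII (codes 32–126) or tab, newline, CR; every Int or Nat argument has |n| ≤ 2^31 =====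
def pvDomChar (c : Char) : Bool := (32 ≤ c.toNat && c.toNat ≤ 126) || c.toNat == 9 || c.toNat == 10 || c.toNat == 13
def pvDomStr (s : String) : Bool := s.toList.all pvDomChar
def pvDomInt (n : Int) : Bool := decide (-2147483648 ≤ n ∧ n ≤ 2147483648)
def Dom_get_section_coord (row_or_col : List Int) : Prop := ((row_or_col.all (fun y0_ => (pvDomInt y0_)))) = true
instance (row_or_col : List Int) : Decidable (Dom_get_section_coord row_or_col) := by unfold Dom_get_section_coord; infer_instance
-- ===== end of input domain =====

-- B replaces A's per-cell boolean 'start'-flag loop by a two-pointer run scan over maximal runs (same O(n) cost, alternative structure).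


-- ===== PORT A =====
-- literal transliteration of A's indexed loop with the 'start' flag and the growing accumulator
def aLoop : List Int → Int → Bool → List Int → List Int
  | [], _, _, acc => acc
  | c :: rest, i, start, acc =>
      let acc' := if c ≠ -1 ∧ start = false then acc ++ [i] else acc
      let start1 := if c ≠ -1 then true else start
      let start2 := if c = -1 then false else start1
      aLoop rest (i + 1) start2 acc'

def get_section_coord (row_or_col : List Int) : List Int :=
  aLoop row_or_col 0 false []

-- ===== PORT B =====
-- the inner `while j < n and …` scan of Source B: split off the maximal run whose (-1)-ness equals k
def spanKey (k : Bool) : List Int → List Int × List Int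
  | [] => ([], [])
  | c :: rest =>
      if decide (c = -1) = k then
        let pr := spanKey k rest
        (c :: pr.1, pr.2)
      else ([], c :: rest)

-- cited by name in bGroups' decreasing_by (termination of the port), so it stays above the claim block
theorem spanKey_snd_length (k : Bool) : ∀ xs : List Int, (spanKey k xs).2.length ≤ xs.length
  | [] => Nat.le_refl _
  | c :: rest => by
      simp only [spanKey]
      split
      · exact Nat.le_succ_of_le (spanKey_snd_length k rest)
      · exact Nat.le_refl _

-- the outer while loop of Source B, phase 1: cut the list into maximal runs (key, length)
def bGroups : List Int → List (Bool × Nat)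
  | [] => []
  | c :: rest =>
      let k := decide (c = -1)
      let pr := spanKey k rest
      (k, pr.1.length + 1) :: bGroups pr.2
termination_by xs => xs.length
decreasing_by
  exact Nat.lt_succ_of_le (spanKey_snd_length _ rest)

-- the outer while loop of Source B, phase 2: record the start position of each non-(-1) run
def bFold : List (Bool × Nat) → Int → List Int
  | [], _ => []
  | (k, n) :: gs, pos => (if k then [] else [pos]) ++ bFold gs (pos + (n : Int))

def get_section_coord_alt (row_or_col : List Int) : List Int :=
  bFold (bGroups row_or_col) 0

-- ===== PRECONDITION & SPEC =====
def Spec_get_section_coord (row_or_col : List Int) (out : List Int) : Prop := out = get_section_coord_alt row_or_col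
instance (row_or_col : List Int) (out : List Int) : Decidable (Spec_get_section_coord row_or_col out) := by unfold Spec_get_section_coord; infer_instance

-- ===== CLAIM (what is proved, stated in full; the proofs are below) =====
def Claim_equal_get_section_coord : Prop := ∀ (row_or_col : List Int), Dom_get_section_coord row_or_col → Spec_get_section_coord row_or_col (get_section_coord row_or_col)

-- ===== LEMMAS AND PROOFS =====
theorem aLoop_acc : ∀ (xs : List Int) (i : Int) (s : Bool) (acc : List Int),
    aLoop xs i s acc = acc ++ aLoop xs i s []
  | [], i, s, acc => by simp [aLoop]
  | c :: rest, i, s, acc => by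
      simp only [aLoop]
      rw [aLoop_acc rest, aLoop_acc rest (i+1) _ (if c ≠ -1 ∧ s = false then ([]:List Int) ++ [i] else [])]
      split_ifs <;> simp

theorem spanKey_spec (k : Bool) : ∀ xs : List Int,
    xs = (spanKey k xs).1 ++ (spanKey k xs).2 ∧
    (∀ c ∈ (spanKey k xs).1, decide (c = -1) = k) ∧
    ((spanKey k xs).2 = [] ∨ ∃ d r', (spanKey k xs).2 = d :: r' ∧ decide (d = -1) ≠ k)
  | [] => by simp [spanKey]
  | c :: rest => by
      simp only [spanKey]
      split_ifs with h
      · obtain ⟨h1, h2, h3⟩ := spanKey_spec k rest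
        refine ⟨by simpa using h1, ?_, h3⟩
        intro d hd
        rcases List.mem_cons.mp hd with rfl | hd2
        · exact h
        · exact h2 d hd2
      · exact ⟨rfl, by simp, Or.inr ⟨c, rest, rfl, h⟩⟩

theorem aLoop_skip_neg : ∀ (p : List Int), (∀ c ∈ p, c = -1) → ∀ (rest : List Int) (i : Int),
    aLoop (p ++ rest) i false [] = aLoop rest (i + p.length) false []
  | [], _, rest, i => by simp
  | c :: p', hp, rest, i => by
      have hc : c = -1 := hp c List.mem_cons_self
      subst hc
      simp only [List.cons_append, aLoop]
      simp only [ne_eq, not_true_eq_false, false_and, if_false, reduceIte, List.length_cons]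
      rw [aLoop_skip_neg p' (fun d hd => hp d (List.mem_cons_of_mem _ hd)) rest (i + 1),
        show i + 1 + ((p'.length : Int)) = i + ((p'.length : Int) + 1) by ring]
      push_cast
      ring_nf

theorem aLoop_skip_pos : ∀ (p : List Int), (∀ c ∈ p, c ≠ -1) → ∀ (rest : List Int) (i : Int),
    aLoop (p ++ rest) i true [] = aLoop rest (i + p.length) true []
  | [], _, rest, i => by simp
  | c :: p', hp, rest, i => by
      have hc : c ≠ -1 := hp c List.mem_cons_self
      simp only [List.cons_append, aLoop]
      simp only [ne_eq, hc, not_false_eq_true, true_and, Bool.true_eq_false, if_false,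
        if_neg hc, if_pos, List.length_cons]
      rw [aLoop_skip_pos p' (fun d hd => hp d (List.mem_cons_of_mem _ hd)) rest (i + 1),
        show i + 1 + ((p'.length : Int)) = i + ((p'.length : Int) + 1) by ring]
      push_cast
      ring_nf

theorem aLoop_flag_irrelevant (rest : List Int) (i : Int)
    (h : rest = [] ∨ ∃ d r', rest = d :: r' ∧ d = -1) :
    aLoop rest i true [] = aLoop rest i false [] := by
  rcases h with rfl | ⟨d, r', rfl, rfl⟩
  · rfl
  · simp [aLoop]

theorem step_neg (p : List Int) (hp : ∀ c ∈ p, c = -1) (r : List Int) (i : Int) :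
    aLoop (-1 :: (p ++ r)) i false [] = aLoop r (i + ((p.length : Int) + 1)) false [] := by
  simp only [aLoop, ne_eq, not_true_eq_false, false_and, if_false, reduceIte, List.nil_append]
  rw [aLoop_skip_neg p hp r (i + 1), show i + 1 + ((p.length : Int)) = i + ((p.length : Int) + 1) by ring]

theorem step_pos (c : Int) (hc : c ≠ -1) (p : List Int) (hp : ∀ d ∈ p, d ≠ -1)
    (r : List Int) (hr : r = [] ∨ ∃ d r', r = d :: r' ∧ d = -1) (i : Int) :
    aLoop (c :: (p ++ r)) i false [] = [i] ++ aLoop r (i + ((p.length : Int) + 1)) false [] := by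
  simp only [aLoop, ne_eq, hc, not_false_eq_true, true_and, reduceIte, if_neg hc,
    List.nil_append]
  rw [aLoop_acc, aLoop_skip_pos p hp r (i + 1), aLoop_flag_irrelevant r _ hr,
    show i + 1 + ((p.length : Int)) = i + ((p.length : Int) + 1) by ring]

theorem main_lemma : ∀ (n : Nat) (xs : List Int), xs.length ≤ n → ∀ i : Int,
    aLoop xs i false [] = bFold (bGroups xs) i := by
  intro n
  induction n with
  | zero =>
      intro xs hxs i
      have hx : xs = [] := List.eq_nil_of_length_eq_zero (Nat.le_zero.mp hxs)
      subst hx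
      simp [aLoop, bGroups, bFold]
  | succ n ih =>
      intro xs hxs i
      match xs with
      | [] => simp [aLoop, bGroups, bFold]
      | c :: rest =>
        obtain ⟨hsplit, hall, hhead⟩ := spanKey_spec (decide (c = -1)) rest
        have hrlen : (spanKey (decide (c = -1)) rest).2.length ≤ n := by
          have h1 := spanKey_snd_length (decide (c = -1)) rest
          simp only [List.length_cons] at hxs
          omega
        have hBG : bGroups (c :: rest)
            = (decide (c = -1), (spanKey (decide (c = -1)) rest).1.length + 1)
              :: bGroups (spanKey (decide (c = -1)) rest).2 := by
          rw [bGroups]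
        rw [hBG]
        by_cases hc : c = -1
        · -- a run of -1 cells: nothing recorded
          have hk : decide (c = -1) = true := decide_eq_true hc
          subst hc
          rw [show (-1 : Int) :: rest
              = -1 :: ((spanKey (decide ((-1:Int) = -1)) rest).1 ++ (spanKey (decide ((-1:Int) = -1)) rest).2) by
                rw [← hsplit]]
          rw [step_neg _ (fun d hd => of_decide_eq_true (by rw [hall d hd]; exact hk)) _ i]
          rw [ih _ hrlen]
          simp [bFold]
        · -- a non-(-1) run: its start index i is recorded
          have hk : decide (c = -1) = false := decide_eq_false hc
          rw [show c :: rest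
              = c :: ((spanKey (decide (c = -1)) rest).1 ++ (spanKey (decide (c = -1)) rest).2) by
                rw [← hsplit]]
          rw [step_pos c hc _ (fun d hd => by
                have h2 := hall d hd
                rw [hk] at h2
                exact of_decide_eq_false h2)
              _ (by
                rcases hhead with h | ⟨d, r', hdr, hd⟩
                · exact Or.inl h
                · refine Or.inr ⟨d, r', hdr, ?_⟩
                  rw [hk] at hd
                  exact of_decide_eq_true (Bool.ne_false_iff.mp hd)) i]
        
          rw [ih _ hrlen]
          simp [bFold, hk]

-- ===== VERDICT (by name: the statement is the Claim_ definition above) =====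
theorem get_section_coord_spec : Claim_equal_get_section_coord := by
  intro xs _
  unfold Spec_get_section_coord get_section_coord get_section_coord_alt
  exact main_lemma xs.length xs (Nat.le_refl _) 0
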